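-- pv_equiv track=rewrite | github.com/stepatron/SteganographyBasics | lab3/lab3-code.py | strDecode
-- ===== SOURCE A (Python) =====
-- def strDecode(msg_cypher):
--     str_temp = ''
--     plain_word = ''
--     for bit in range(len(msg_cypher)):
--         str_temp += msg_cypher[bit]
--         if len(str_temp) == 7:
--             if str_temp == '1111111':
--                 plain_word += ' '
--             else:
--                 plain_word += chr(int(str_temp, 2)+1024)
--             str_temp = ''
--     return plain_word
-- ===== SOURCE B (Python) =====
-- def strDecode(msg_cypher):
--     # Chunk-slicing pass: walk 7-char windows, no growing buffer or length check.
--     out = []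
--     i = 0
--     while i + 7 <= len(msg_cypher):
--         chunk = msg_cypher[i:i+7]
--         out.append(' ' if chunk == '1111111' else chr(int(chunk, 2) + 1024))
--         i += 7
--     return ''.join(out)
-- ===== Notes on version B (the rewrite author's own statement) =====
-- stated objective: simpler
-- what changed: B slices the input into 7-character windows and decodes each directly, instead of A's per-character loop that grows a buffer and flushes it on a length-7 check.
-- outside the precondition, e.g. on strDecode(' 111111'): A returns 'п', B returns 'п'
import Mathlib
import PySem

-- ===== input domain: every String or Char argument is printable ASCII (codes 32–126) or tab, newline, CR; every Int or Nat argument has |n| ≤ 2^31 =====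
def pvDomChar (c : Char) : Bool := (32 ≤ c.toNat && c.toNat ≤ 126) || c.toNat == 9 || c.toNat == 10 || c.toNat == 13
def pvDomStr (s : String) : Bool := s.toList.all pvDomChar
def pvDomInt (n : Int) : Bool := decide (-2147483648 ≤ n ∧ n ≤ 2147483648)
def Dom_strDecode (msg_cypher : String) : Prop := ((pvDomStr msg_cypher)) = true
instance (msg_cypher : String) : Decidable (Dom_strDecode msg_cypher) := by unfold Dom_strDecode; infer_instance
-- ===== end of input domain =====

-- B decodes 7-char windows directly instead of A's per-character buffer-and-flush loop (simpler decomposition; same cost).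


-- ===== PORT A =====
-- int(t, 2) ported as a binary fold; exact because Pre_ restricts the complete chunks to binary digit characters.
def pvBinVal (t : List Char) : Nat := t.foldl (fun a c => 2 * a + (if c = '1' then 1 else 0)) 0

def pvChunkChar (t : List Char) : Char :=
  if t = ['1','1','1','1','1','1','1'] then ' ' else Char.ofNat (pvBinVal t + 1024)

def pvStepA (st : List Char × List Char) (c : Char) : List Char × List Char :=
  let t := st.1 ++ [c]
  if t.length = 7 then ([], st.2 ++ [pvChunkChar t]) else (t, st.2)

def strDecode (msg_cypher : String) : String :=
  String.mk (msg_cypher.toList.foldl pvStepA ([], [])).2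

-- ===== PORT B =====
def pvGoB (l : List Char) : List Char :=
  if h : 7 ≤ l.length then pvChunkChar (l.take 7) :: pvGoB (l.drop 7) else []
termination_by l.length
decreasing_by simp; omega

def strDecode_alt (msg_cypher : String) : String :=
  String.mk (pvGoB msg_cypher.toList)

-- ===== PRECONDITION & SPEC =====
-- Pre_ excludes inputs where some complete 7-char chunk contains a non-binary-digit character:
-- there Python's int(chunk, 2) usually raises ValueError; a few decorated chunks (leading/trailing
-- spaces, signs, underscores) still parse in Python, which the binary-fold ports do not model.
def Pre_strDecode (msg_cypher : String) : Prop :=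
  ((msg_cypher.toList.take (msg_cypher.toList.length - msg_cypher.toList.length % 7)).all
    (fun c => c = '0' || c = '1')) = true
instance (msg_cypher : String) : Decidable (Pre_strDecode msg_cypher) := by unfold Pre_strDecode; infer_instance

def pvWitness_strDecode : String := "1000001"

def Spec_strDecode (msg_cypher : String) (out : String) : Prop := out = strDecode_alt msg_cypher
instance (msg_cypher : String) (out : String) : Decidable (Spec_strDecode msg_cypher out) := by unfold Spec_strDecode; infer_instance

-- ===== CLAIM (what is proved, stated in full; the proofs are below) =====
def Claim_equal_strDecode : Prop := ∀ (msg_cypher : String), Dom_strDecode msg_cypher → Pre_strDecode msg_cypher → Spec_strDecode msg_cypher (strDecode msg_cypher)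

-- ===== LEMMAS AND PROOFS =====

theorem pvGoB_short {l : List Char} (h : l.length < 7) : pvGoB l = [] := by
  rw [pvGoB]; simp [Nat.not_le.mpr h]

theorem pvGoB_chunk {t l : List Char} (h : t.length = 7) :
    pvGoB (t ++ l) = pvChunkChar t :: pvGoB l := by
  rw [pvGoB]
  have h7 : 7 ≤ (t ++ l).length := by simp [h]
  simp [h]

theorem pvFoldA_eq_goB (l : List Char) : ∀ (t out : List Char), t.length < 7 →
    (l.foldl pvStepA (t, out)).2 = out ++ pvGoB (t ++ l) := by
  induction l with
  | nil =>
      intro t out ht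
      simp [pvGoB_short ht]
  | cons c l ih =>
      intro t out ht
      simp only [List.foldl_cons]
      by_cases h7 : (t ++ [c]).length = 7
      · rw [show pvStepA (t, out) c = ([], out ++ [pvChunkChar (t ++ [c])]) from by
          simp [pvStepA, h7]]
        rw [ih [] _ (by simp)]
        have : t ++ c :: l = (t ++ [c]) ++ l := by simp
        rw [this, pvGoB_chunk h7]
        simp
      · rw [show pvStepA (t, out) c = (t ++ [c], out) from by
          have h6 : ¬ t.length = 6 := by simp at h7; omega
          simp [pvStepA, h6]]
        have hlt : (t ++ [c]).length < 7 := by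
          simp at h7 ⊢; omega
        rw [ih _ _ hlt]
        simp

-- ===== VERDICT (by name: the statement is the Claim_ definition above) =====
theorem strDecode_spec : Claim_equal_strDecode := by
  intro s _ _
  unfold Spec_strDecode strDecode strDecode_alt
  rw [pvFoldA_eq_goB s.toList [] [] (by simp)]
  simp
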